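-- pv_equiv track=rewrite | github.com/sueminPark/Alogorithm | 프로그래머스/unrated/181926. 수 조작하기 1/수 조작하기 1.py | solution
-- ===== SOURCE A (Python) =====
-- def solution(n, control):
--     ans = n
--
--     for i in control:
--         if i == "w":
--             ans += 1
--         elif i == "s":
--             ans -= 1
--         elif i == "d":
--             ans += 10
--         elif i == "a":
--             ans -= 10
--     return ans
-- ===== SOURCE B (Python) =====
-- def solution(n, control):
--     hist = {}
--     for c in control:
--         hist[c] = hist.get(c, 0) + 1
--     deltas = {"w": 1, "s": -1, "d": 10, "a": -10}
--     return n + sum(deltas.get(c, 0) * k for c, k in hist.items())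
-- ===== Notes on version B (the rewrite author's own statement) =====
-- stated objective: alternative
-- what changed: Instead of accumulating a running total with a branch per character, B first builds a character histogram (dict) in one pass and then computes a weighted sum of the distinct characters' counts against a delta table.
import Mathlib
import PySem

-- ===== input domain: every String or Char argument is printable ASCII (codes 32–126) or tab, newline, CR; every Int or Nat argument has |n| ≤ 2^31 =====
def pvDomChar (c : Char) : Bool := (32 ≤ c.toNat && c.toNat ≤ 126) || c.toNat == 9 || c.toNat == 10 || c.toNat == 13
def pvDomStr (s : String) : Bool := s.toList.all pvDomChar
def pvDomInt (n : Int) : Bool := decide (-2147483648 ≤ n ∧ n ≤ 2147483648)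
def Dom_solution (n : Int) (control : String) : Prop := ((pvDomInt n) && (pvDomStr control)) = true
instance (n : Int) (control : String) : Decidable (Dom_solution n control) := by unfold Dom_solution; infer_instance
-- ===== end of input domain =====

-- B replaces A's branch-per-character running accumulation by a two-stage algorithm:
-- build a character histogram (dict) in one pass, then take a weighted sum of the
-- distinct characters' counts against a delta table (alternative decomposition).

-- ===== PORT A =====
def solution (n : Int) (control : String) : Int :=
  control.toList.foldl
    (fun ans i =>
      if i = 'w' then ans + 1
      else if i = 's' then ans - 1
      else if i = 'd' then ans + 10
      else if i = 'a' then ans - 10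
      else ans)
    n

-- ===== PORT B =====
def solutionAltDeltas : PySem.Dict Char Int :=
  PySem.Dict.ofList [('w', 1), ('s', -1), ('d', 10), ('a', -10)]

def solution_alt (n : Int) (control : String) : Int :=
  let hist : PySem.Dict Char Int :=
    control.toList.foldl (fun d c => d.insert c (d.getD c 0 + 1)) PySem.Dict.empty
  n + hist.items.foldl (fun acc p => acc + solutionAltDeltas.getD p.1 0 * p.2) 0

-- ===== PRECONDITION & SPEC =====
def Spec_solution (n : Int) (control : String) (out : Int) : Prop := out = solution_alt n control
instance (n : Int) (control : String) (out : Int) : Decidable (Spec_solution n control out) := by unfold Spec_solution; infer_instance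

-- ===== CLAIM (what is proved, stated in full; the proofs are below) =====
def Claim_equal_solution : Prop := ∀ (n : Int) (control : String), Dom_solution n control → Spec_solution n control (solution n control)

-- ===== LEMMAS AND PROOFS =====

-- A's loop in closed form over character counts.
theorem foldl_deltas (cs : List Char) (n : Int) :
    cs.foldl
      (fun ans i =>
        if i = 'w' then ans + 1
        else if i = 's' then ans - 1
        else if i = 'd' then ans + 10
        else if i = 'a' then ans - 10
        else ans)
      n
    = n + (cs.count 'w' : Int) - (cs.count 's' : Int)
        + 10 * (cs.count 'd' : Int) - 10 * (cs.count 'a' : Int) := by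
  induction cs generalizing n with
  | nil => simp
  | cons h t ih =>
    simp only [List.foldl_cons, ih, List.count_cons]
    by_cases h1 : h = 'w' <;> by_cases h2 : h = 's' <;> by_cases h3 : h = 'd' <;>
      by_cases h4 : h = 'a' <;> simp_all <;> ring

theorem deltas_eq_mk :
    solutionAltDeltas = PySem.Dict.mk [('w', 1), ('s', -1), ('d', 10), ('a', -10)] := by decide

-- The delta table lookup in closed form.
theorem deltas_getD (c : Char) :
    solutionAltDeltas.getD c 0
    = if c = 'w' then 1 else if c = 's' then -1 else if c = 'd' then 10
      else if c = 'a' then -10 else 0 := by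
  by_cases h1 : c = 'w'
  · subst h1; decide
  by_cases h2 : c = 's'
  · subst h2; decide
  by_cases h3 : c = 'd'
  · subst h3; decide
  by_cases h4 : c = 'a'
  · subst h4; decide
  have hw : ('w' == c) = false := beq_eq_false_iff_ne.mpr (Ne.symm h1)
  have hs : ('s' == c) = false := beq_eq_false_iff_ne.mpr (Ne.symm h2)
  have hd : ('d' == c) = false := beq_eq_false_iff_ne.mpr (Ne.symm h3)
  have ha : ('a' == c) = false := beq_eq_false_iff_ne.mpr (Ne.symm h4)
  rw [deltas_eq_mk]
  simp [PySem.Dict.getD, PySem.Dict.get?, hw, hs, hd, ha, h1, h2, h3, h4]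

-- Weighted sum of any nodup key list against the delta table, in closed form.
theorem sum_over_keys (L : List Char) (g : Char → Int) (hnd : L.Nodup) :
    (L.map (fun k => solutionAltDeltas.getD k 0 * g k)).sum
    = (if 'w' ∈ L then g 'w' else 0) - (if 's' ∈ L then g 's' else 0)
      + 10 * (if 'd' ∈ L then g 'd' else 0) - 10 * (if 'a' ∈ L then g 'a' else 0) := by
  induction L with
  | nil => simp
  | cons h t ih =>
    rw [List.nodup_cons] at hnd
    rw [List.map_cons, List.sum_cons, ih hnd.2, deltas_getD h]
    by_cases h1 : h = 'w'
    · subst h1; simp [hnd.1]; split_ifs <;> ring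
    by_cases h2 : h = 's'
    · subst h2; simp [hnd.1, h1]; split_ifs <;> ring
    by_cases h3 : h = 'd'
    · subst h3; simp [hnd.1, h1, h2]; split_ifs <;> ring
    by_cases h4 : h = 'a'
    · subst h4; simp [hnd.1, h1, h2, h3]; split_ifs <;> ring
    · simp [h1, h2, h3, h4, Ne.symm h1, Ne.symm h2, Ne.symm h3, Ne.symm h4]


theorem count_ite_mem (cs : List Char) (c : Char) :
    (if c ∈ PySem.Set.ofList cs then (cs.count c : Int) else 0) = (cs.count c : Int) := by
  split_ifs with h
  · rfl
  · rw [PySem.Set.mem_ofList] at h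
    simp [List.count_eq_zero_of_not_mem h]

theorem foldl_delta_sum (l : List (Char × Int)) (a : Int) :
    l.foldl (fun acc p => acc + solutionAltDeltas.getD p.1 0 * p.2) a
    = a + (l.map (fun p => solutionAltDeltas.getD p.1 0 * p.2)).sum := by
  induction l generalizing a with
  | nil => simp
  | cons p t ih => simp [List.foldl_cons, ih]; ring

-- ===== VERDICT (by name: the statement is the Claim_ definition above) =====
theorem solution_spec : Claim_equal_solution := by
  intro n control _
  unfold Spec_solution solution solution_alt
  rw [PySem.Dict.foldl_insert_getD_add_one_eq_counter, foldl_deltas]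
  show _ = n + (PySem.Dict.counter control.toList).items.foldl
      (fun acc p => acc + solutionAltDeltas.getD p.1 0 * p.2) 0
  rw [foldl_delta_sum, PySem.Dict.items_counter, List.map_map]
  have h := sum_over_keys (PySem.Set.ofList control.toList)
    (fun k => (control.toList.count k : Int)) (PySem.Set.nodup_ofList _)
  simp only [Function.comp_def] at h ⊢
  rw [h, count_ite_mem, count_ite_mem, count_ite_mem, count_ite_mem]
  ring
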